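-- pv_equiv track=rewrite | github.com/state-alchemists/zrb | src/zrb/util/string/conversion.py | _to_space_separated
-- ===== SOURCE A (Python) =====
-- def _to_space_separated(text: str | None) -> str:
--     text = str(text) if text is not None else ""
--     text = text.replace("-", " ").replace("_", " ")
--     parts = text.split(" ")
--     new_parts = []
--     for part in parts:
--         new_part = ""
--         for char_index, char in enumerate(part):
--             is_first = char_index == 0
--             is_last = char_index == len(part) - 1
--             previous_char = part[char_index - 1] if not is_first else ""
--             next_char = part[char_index + 1] if not is_last else ""
--             if (
--                 char.isupper()
--                 and char != " "
--                 and (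
--                     (not is_last and next_char.islower())
--                     or (not is_first and previous_char.islower())
--                 )
--             ):
--                 new_part += " " + char
--                 continue
--             new_part += char
--         new_part = new_part.strip(" ")
--         if new_part != "":
--             new_parts.append(new_part)
--     return " ".join(new_parts).strip(" ")
-- ===== SOURCE B (Python) =====
-- def _to_space_separated(text):
--     s = str(text) if text is not None else ""
--     chars = list(s)
--     words = []
--     buf = ""
--     prev = ""
--     for ch, nxt in zip(chars, chars[1:] + [""]):
--         if ch == " " or ch == "-" or ch == "_":
--             if buf:
--                 words.append(buf)
--             buf = ""
--         elif ch.isupper() and (prev.islower() or nxt.islower()):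
--             if buf:
--                 words.append(buf)
--             buf = ch
--         else:
--             buf += ch
--         prev = ch
--     if buf:
--         words.append(buf)
--     return " ".join(words)
-- ===== Notes on version B (the rewrite author's own statement) =====
-- stated objective: simpler
-- what changed: Replaced A's replace-then-split pipeline with nested per-part index loops, space re-insertion, per-part stripping and empty filtering by one left-to-right pass over the original string that flushes a word buffer at delimiters and before camelCase boundaries, then joins the collected words once.
import Mathlib
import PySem

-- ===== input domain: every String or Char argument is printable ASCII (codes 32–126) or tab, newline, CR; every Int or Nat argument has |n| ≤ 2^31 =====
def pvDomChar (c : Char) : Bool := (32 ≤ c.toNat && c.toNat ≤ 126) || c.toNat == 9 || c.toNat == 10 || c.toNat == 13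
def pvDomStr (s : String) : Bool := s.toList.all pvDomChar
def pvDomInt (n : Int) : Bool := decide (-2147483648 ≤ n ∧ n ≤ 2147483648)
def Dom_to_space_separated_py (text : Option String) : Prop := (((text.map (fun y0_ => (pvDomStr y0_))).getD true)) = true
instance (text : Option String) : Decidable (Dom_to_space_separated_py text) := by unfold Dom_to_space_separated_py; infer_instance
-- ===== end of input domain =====

-- B replaces A's replace→split→per-part index loops→strip→filter→join pipeline by a single
-- left-to-right buffered pass; same return value, objective: simpler.

-- ===== PORT A =====
-- port of _to_space_separated (strings handled as their char lists; PySem.Chars.* are the exact Python string ops)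
-- body of A's inner `for char_index, char in enumerate(part)` loop
def pvStepA (part : List Char) (new_part : List Char) (ic : Int × Char) : List Char :=
  let char_index := ic.1
  let c := ic.2
  let is_first := char_index == 0
  let is_last := char_index == (part.length : Int) - 1
  let previous_char : Option Char := if !is_first then PySem.List.pyGet? part (char_index - 1) else none
  let next_char : Option Char := if !is_last then PySem.List.pyGet? part (char_index + 1) else none
  if PySem.Chars.isupper c && !(c == ' ') &&
     ((!is_last && (next_char.map PySem.Chars.islower).getD false) ||
      (!is_first && (previous_char.map PySem.Chars.islower).getD false)) then
    new_part ++ [' ', c]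
  else new_part ++ [c]

-- body of A's outer `for part in parts` loop
def pvPartStepA (new_parts : List (List Char)) (part : List Char) : List (List Char) :=
  let new_part := (PySem.List.enumerate part).foldl (pvStepA part) []
  let new_part := PySem.Chars.stripChars new_part [' ']
  if !(new_part == []) then new_parts ++ [new_part] else new_parts

def to_space_separated_py (text : Option String) : String :=
  let t : String := match text with | some s => s | none => ""
  let t := PySem.Str.replace (PySem.Str.replace t "-" " ") "_" " "
  let parts := PySem.Chars.splitOn t.toList [' ']
  let new_parts := parts.foldl pvPartStepA ([] : List (List Char))
  String.ofList (PySem.Chars.stripChars (PySem.Chars.join [' '] new_parts) [' '])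

-- ===== PORT B =====
-- port of Source B: one pass, state (words, buf, prev); nxt comes from zip(chars, chars[1:]+[""])
def pvStepB (st : List (List Char) × List Char × Option Char) (cn : Char × Option Char) :
    List (List Char) × List Char × Option Char :=
  let words := st.1
  let buf := st.2.1
  let prev := st.2.2
  let ch := cn.1
  let nxt := cn.2
  if ch == ' ' || ch == '-' || ch == '_' then
    ((if !(buf == []) then words ++ [buf] else words), [], some ch)
  else if PySem.Chars.isupper ch &&
      ((prev.map PySem.Chars.islower).getD false || (nxt.map PySem.Chars.islower).getD false) then
    ((if !(buf == []) then words ++ [buf] else words), [ch], some ch)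
  else (words, buf ++ [ch], some ch)

def to_space_separated_py_alt (text : Option String) : String :=
  let s : String := match text with | some s => s | none => ""
  let chars := s.toList
  let st := (chars.zip ((chars.drop 1).map some ++ [none])).foldl pvStepB
    (([], [], none) : List (List Char) × List Char × Option Char)
  let words := if !(st.2.1 == []) then st.1 ++ [st.2.1] else st.1
  String.ofList (PySem.Chars.join [' '] words)

-- ===== PRECONDITION & SPEC =====
def Spec_to_space_separated_py (text : Option String) (out : String) : Prop := out = to_space_separated_py_alt text
instance (text : Option String) (out : String) : Decidable (Spec_to_space_separated_py text out) := by unfold Spec_to_space_separated_py; infer_instance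

-- ===== CLAIM (what is proved, stated in full; the proofs are below) =====
def Claim_equal_to_space_separated_py : Prop := ∀ (text : Option String), Dom_to_space_separated_py text → Spec_to_space_separated_py text (to_space_separated_py text)

-- ===== LEMMAS AND PROOFS =====

-- delimiter test
def pvD (c : Char) : Bool := c == ' ' || c == '-' || c == '_'
-- islower of an optional char ('' in the Pythons)
def pvLow (o : Option Char) : Bool := (o.map PySem.Chars.islower).getD false
-- the character substitution performed by A's two replace calls
def pvSub (c : Char) : Char := if (if c == '-' then ' ' else c) == '_' then ' ' else (if c == '-' then ' ' else c)
-- " ".join at char level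
def pvJoin (ws : List (List Char)) : List Char := PySem.Chars.join [' '] ws

-- split on ' ' as (first piece, later pieces)
def pvSA : List Char → List Char × List (List Char)
  | [] => ([], [])
  | c :: t => if c == ' ' then ([], (pvSA t).1 :: (pvSA t).2) else (c :: (pvSA t).1, (pvSA t).2)

-- split on delimiters as (first piece, later pieces)
def pvPA : List Char → List Char × List (List Char)
  | [] => ([], [])
  | c :: t => if pvD c then ([], (pvPA t).1 :: (pvPA t).2) else (c :: (pvPA t).1, (pvPA t).2)

-- A's per-character condition, neighbours as options
def pvCondA (prev : Option Char) (c : Char) (next : Option Char) : Bool :=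
  PySem.Chars.isupper c && !(c == ' ') && (pvLow next || pvLow prev)

-- A's inner loop as structural recursion
def pvExpand : Option Char → List Char → List Char
  | _, [] => []
  | prev, c :: t => (if pvCondA prev c t.head? then [' ', c] else [c]) ++ pvExpand (some c) t

-- canonical per-part word splitter (pl = "previous char is lowercase")
def pvCondP (pl : Bool) (c : Char) (next : Option Char) : Bool :=
  PySem.Chars.isupper c && (pvLow next || pl)

def pvPwords : Bool → List Char → List Char → List (List Char)
  | _, buf, [] => if buf = [] then [] else [buf]
  | pl, buf, c :: t =>
    if pvCondP pl c t.head? then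
      (if buf = [] then [] else [buf]) ++ pvPwords (PySem.Chars.islower c) [c] t
    else pvPwords (PySem.Chars.islower c) (buf ++ [c]) t

-- B's loop as structural recursion
def pvBwords : Option Char → List Char → List Char → List (List Char)
  | _, buf, [] => if buf = [] then [] else [buf]
  | prev, buf, c :: t =>
    if pvD c then (if buf = [] then [] else [buf]) ++ pvBwords (some c) [] t
    else if PySem.Chars.isupper c && (pvLow prev || pvLow t.head?) then
      (if buf = [] then [] else [buf]) ++ pvBwords (some c) [c] t
    else pvBwords (some c) (buf ++ [c]) t

theorem pv_upper_ne_space {c : Char} (h : PySem.Chars.isupper c = true) : (c == ' ') = false := by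
  simp only [PySem.Chars.isupper, Bool.and_eq_true, decide_eq_true_eq] at h
  simp only [beq_eq_false_iff_ne]
  rintro rfl
  exact absurd h.1 (by decide)

theorem pv_delim_not_lower {c : Char} (h : pvD c = true) : PySem.Chars.islower c = false := by
  simp only [pvD, Bool.or_eq_true, beq_iff_eq] at h
  rcases h with (rfl | rfl) | rfl <;> decide

theorem pv_replace_go (o n : Char) : ∀ (fuel : Nat) (l acc : List Char), l.length ≤ fuel →
    PySem.Chars.replace.go [o] [n] fuel l acc
      = acc.reverse ++ l.map (fun c => if c == o then n else c) := by
  intro fuel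
  induction fuel with
  | zero =>
    intro l acc h
    have : l = [] := List.eq_nil_of_length_eq_zero (Nat.le_zero.mp h)
    subst this
    rw [PySem.Chars.replace.go]
    simp
  | succ fuel ih =>
    intro l acc h
    cases l with
    | nil => rw [PySem.Chars.replace.go]; simp; omega
    | cons c t =>
      rw [PySem.Chars.replace.go]
      by_cases hc : c = o
      · subst hc
        have hpre : List.isPrefixOf [c] (c :: t) = true := by simp [List.isPrefixOf]
        simp only [hpre, if_pos]
        rw [ih (List.drop [c].length (c :: t)) ([n].reverse ++ acc) (by simp at h ⊢; omega)]
        simp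
      · have hpre : List.isPrefixOf [o] (c :: t) = false := by
          simp [List.isPrefixOf]; exact fun hh => absurd hh.symm hc
        simp only [hpre]
        rw [if_neg (by simp)]
        rw [ih t (c :: acc) (Nat.lt_succ_iff.mp (by simpa using h))]
        simp [hc]

theorem pv_splitOn_go : ∀ (fuel : Nat) (l cur : List Char) (acc : List (List Char)), l.length ≤ fuel →
    PySem.Chars.splitOn.go [' '] fuel l cur acc
      = acc.reverse ++ (cur.reverse ++ (pvSA l).1) :: (pvSA l).2 := by
  intro fuel
  induction fuel with
  | zero =>
    intro l cur acc h
    have : l = [] := List.eq_nil_of_length_eq_zero (Nat.le_zero.mp h)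
    subst this
    rw [PySem.Chars.splitOn.go]
    simp [pvSA]
  | succ fuel ih =>
    intro l cur acc h
    cases l with
    | nil => rw [PySem.Chars.splitOn.go]; simp [pvSA]; omega
    | cons c t =>
      rw [PySem.Chars.splitOn.go]
      by_cases hc : c = ' '
      · subst hc
        have hpre : List.isPrefixOf [' '] (' ' :: t) = true := by simp [List.isPrefixOf]
        simp only [hpre, if_pos]
        rw [ih (List.drop [' '].length (' ' :: t)) [] (cur.reverse :: acc) (by simp at h ⊢; omega)]
        simp [pvSA]
      · have hpre : List.isPrefixOf [' '] (c :: t) = false := by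
          simp [List.isPrefixOf]; exact fun hh => absurd hh.symm hc
        simp only [hpre]
        rw [if_neg (by simp)]
        rw [ih t (c :: cur) acc (by simp at h ⊢; omega)]
        simp [pvSA, hc]

theorem pv_splitOn_space (l : List Char) :
    PySem.Chars.splitOn l [' '] = (pvSA l).1 :: (pvSA l).2 := by
  rw [PySem.Chars.splitOn, pv_splitOn_go (l.length + 1) l [] [] (by omega)]
  simp

theorem pv_sub_space {c : Char} : (pvSub c == ' ') = pvD c := by
  by_cases h1 : c = '-'
  · subst h1; decide
  · by_cases h2 : c = '_'
    · subst h2; decide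
    · by_cases h3 : c = ' '
      · subst h3; decide
      · have e1 : (c == '-') = false := by simp [h1]
        have e2 : (c == '_') = false := by simp [h2]
        have e3 : (c == ' ') = false := by simp [h3]
        simp [pvSub, pvD, e1, e2, e3]

theorem pv_sub_id {c : Char} (h : pvD c = false) : pvSub c = c := by
  simp only [pvD, Bool.or_eq_false_iff, beq_eq_false_iff_ne] at h
  simp [pvSub, h.1.2, h.2]

theorem pv_sA_map_sub (l : List Char) : pvSA (l.map pvSub) = pvPA l := by
  induction l with
  | nil => rfl
  | cons c t ih =>
    simp only [List.map_cons, pvSA, pvPA, ih, pv_sub_space]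
    by_cases hc : pvD c = true
    · simp [hc]
    · rw [Bool.not_eq_true] at hc
      simp [hc, pv_sub_id hc]

theorem pv_pA_no_delim (l : List Char) :
    (∀ c ∈ (pvPA l).1, pvD c = false) ∧ (∀ p ∈ (pvPA l).2, ∀ c ∈ p, pvD c = false) := by
  induction l with
  | nil => simp [pvPA]
  | cons c t ih =>
    by_cases hc : pvD c = true
    · simp only [pvPA, hc, if_true]
      refine ⟨by simp, ?_⟩
      intro p hp
      rcases List.mem_cons.mp hp with rfl | hp
      · exact ih.1
      · exact ih.2 p hp
    · rw [Bool.not_eq_true] at hc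
      simp only [pvPA, hc, Bool.false_eq_true, if_false]
      refine ⟨?_, ih.2⟩
      intro x hx
      rcases List.mem_cons.mp hx with rfl | hx
      · exact hc
      · exact ih.1 x hx

theorem pv_replace_char (l : List Char) (o n : Char) :
    PySem.Chars.replace l [o] [n] = l.map (fun c => if c == o then n else c) := by
  rw [PySem.Chars.replace]
  rw [if_neg (by simp)]
  simpa using pv_replace_go o n l.length l [] (le_refl _)

theorem pv_condA_eq_condP (prev : Option Char) (c : Char) (next : Option Char) :
    pvCondA prev c next = pvCondP (pvLow prev) c next := by
  simp only [pvCondA, pvCondP]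
  by_cases hu : PySem.Chars.isupper c = true
  · simp [hu, pv_upper_ne_space hu]
  · rw [Bool.not_eq_true] at hu
    simp [hu]

theorem pv_stepA_append (part : List Char) (acc : List Char) (ic : Int × Char) :
    pvStepA part acc ic = acc ++ pvStepA part [] ic := by
  simp only [pvStepA, apply_ite (fun z : List Char => acc ++ z)]
  split <;> simp

theorem pv_stepA_eval (pre t : List Char) (c : Char) (acc : List Char) :
    pvStepA (pre ++ c :: t) acc ((pre.length : Int), c)
      = acc ++ (if pvCondA pre.getLast? c t.head? then [' ', c] else [c]) := by
  rw [pv_stepA_append]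
  congr 1
  have hfirst : ((pre.length : Int) == 0) = decide (pre = []) := by
    rcases pre with _ | ⟨a, pre'⟩
    · simp
    · simp
      omega
  have hlast : ((pre.length : Int) == ((pre ++ c :: t).length : Int) - 1) = decide (t = []) := by
    rcases t with _ | ⟨b, t'⟩
    · simp
    · simp
      omega
  have hprev : pre ≠ [] → PySem.List.pyGet? (pre ++ c :: t) ((pre.length : Int) - 1) = pre.getLast? := by
    intro hne
    have hpos : 0 < pre.length := List.length_pos_of_ne_nil hne
    have h1 : ((pre.length : Int) - 1) = ((pre.length - 1 : Nat) : Int) := by omega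
    rw [h1, PySem.List.pyGet?_natCast]
    rw [List.getElem?_append_left (by omega)]
    rw [List.getLast?_eq_getElem?]
  have hnext : PySem.List.pyGet? (pre ++ c :: t) ((pre.length : Int) + 1) = t.head? := by
    have h1 : ((pre.length : Int) + 1) = ((pre.length + 1 : Nat) : Int) := by omega
    rw [h1, PySem.List.pyGet?_natCast]
    rw [List.getElem?_append_right (by omega)]
    have h2 : pre.length + 1 - pre.length = 1 := by omega
    rw [h2]
    simp [List.head?_eq_getElem?]
  simp only [pvStepA, hfirst, hlast]
  rcases Decidable.em (pre = []) with hpre | hpre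
  · rcases Decidable.em (t = []) with ht | ht
    · subst hpre; subst ht
      simp [pvCondA, pvLow]
    · subst hpre
      simp only [List.nil_append, List.length_nil, Nat.cast_zero, zero_add] at hnext
      simp [pvCondA, pvLow, ht, hnext]
  · rcases Decidable.em (t = []) with ht | ht
    · subst ht
      simp [pvCondA, pvLow, hpre, hprev hpre]
    · simp [pvCondA, pvLow, hpre, ht, hprev hpre, hnext]

theorem pv_foldA (suf : List Char) : ∀ (pre acc : List Char),
    (PySem.List.enumerate suf (pre.length : Int)).foldl (pvStepA (pre ++ suf)) acc
      = acc ++ pvExpand pre.getLast? suf := by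
  induction suf with
  | nil =>
    intro pre acc
    simp [PySem.List.enumerate, pvExpand]
  | cons c t ih =>
    intro pre acc
    rw [PySem.List.enumerate_cons, List.foldl_cons]
    have h1 : ((pre.length : Int) + 1) = (((pre ++ [c]).length : Nat) : Int) := by simp
    have h2 : pre ++ c :: t = (pre ++ [c]) ++ t := by simp
    rw [pv_stepA_eval pre t c acc, h1]
    conv_lhs => rw [h2]
    rw [ih (pre ++ [c]) _]
    simp [pvExpand]

theorem pv_foldA_whole (part : List Char) :
    (PySem.List.enumerate part).foldl (pvStepA part) [] = pvExpand none part := by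
  have := pv_foldA part [] []
  simpa using this

theorem pv_zip_next_cons (c : Char) (t : List Char) :
    (c :: t).zip (((c :: t).drop 1).map some ++ [none])
      = (c, t.head?) :: t.zip ((t.drop 1).map some ++ [none]) := by
  rcases t with _ | ⟨b, t'⟩ <;> simp

theorem pv_foldB (l : List Char) : ∀ (words : List (List Char)) (buf : List Char) (prev : Option Char),
    (let st := (l.zip ((l.drop 1).map some ++ [none])).foldl pvStepB (words, buf, prev)
     if !(st.2.1 == []) then st.1 ++ [st.2.1] else st.1) = words ++ pvBwords prev buf l := by
  induction l with
  | nil =>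
    intro words buf prev
    simp only [List.zip_nil_left, List.foldl_nil, pvBwords]
    by_cases hb : buf = [] <;> simp [hb]
  | cons c t ih =>
    intro words buf prev
    simp only [pv_zip_next_cons, List.foldl_cons]
    by_cases hd : pvD c = true
    · have : pvStepB (words, buf, prev) (c, t.head?)
          = ((if !(buf == []) then words ++ [buf] else words), [], some c) := by
        simp only [pvStepB, pvD] at hd ⊢
        rw [if_pos hd]
      rw [this, ih]
      simp only [pvBwords, hd, if_true]
      by_cases hb : buf = [] <;> simp [hb]
    · rw [Bool.not_eq_true] at hd
      by_cases hu : (PySem.Chars.isupper c && (pvLow prev || pvLow t.head?)) = true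
      · have : pvStepB (words, buf, prev) (c, t.head?)
            = ((if !(buf == []) then words ++ [buf] else words), [c], some c) := by
          simp only [pvStepB, pvD] at hd ⊢
          rw [if_neg (by simp [hd]), if_pos (by simpa [pvLow] using hu)]
        rw [this, ih]
        simp only [pvBwords, hd, Bool.false_eq_true, if_false, hu, if_true]
        by_cases hb : buf = [] <;> simp [hb]
      · have : pvStepB (words, buf, prev) (c, t.head?) = (words, buf ++ [c], some c) := by
          simp only [pvStepB, pvD] at hd ⊢
          rw [if_neg (by simp [hd]), if_neg (by simpa [pvLow] using hu)]
        rw [this, ih]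
        simp only [pvBwords, hd, Bool.false_eq_true, if_false, hu]

theorem pv_join_nil : pvJoin [] = [] := by
  simp [pvJoin, PySem.Chars.join, List.intercalate]

theorem pv_join_cons (w : List Char) (ws : List (List Char)) :
    pvJoin (w :: ws) = w ++ (if ws = [] then [] else ' ' :: pvJoin ws) := by
  rcases ws with _ | ⟨v, ws'⟩
  · simp [pvJoin, PySem.Chars.join, List.intercalate]
  · simp [pvJoin, PySem.Chars.join, List.intercalate, List.intersperse]

theorem pv_join_append (xs ys : List (List Char)) (hx : xs ≠ []) (hy : ys ≠ []) :
    pvJoin (xs ++ ys) = pvJoin xs ++ ' ' :: pvJoin ys := by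
  induction xs with
  | nil => exact absurd rfl hx
  | cons w xs ih =>
    rcases xs with _ | ⟨v, xs'⟩
    · rcases ys with _ | ⟨u, ys'⟩
      · exact absurd rfl hy
      · simp [pv_join_cons]
    · rw [List.cons_append, pv_join_cons, ih (by simp), pv_join_cons w (v :: xs')]
      simp

theorem pv_join_eq_nil_iff (ws : List (List Char)) (h : ∀ w ∈ ws, w ≠ []) :
    (pvJoin ws = [] ↔ ws = []) := by
  constructor
  · intro hj
    rcases ws with _ | ⟨w, ws'⟩
    · rfl
    · rw [pv_join_cons] at hj
      rcases List.append_eq_nil_iff.mp hj with ⟨hw, _⟩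
      exact absurd hw (h w (by simp))
  · rintro rfl; exact pv_join_nil

theorem pv_join_head (w : List Char) (ws : List (List Char)) (h : w ≠ []) :
    (pvJoin (w :: ws)).head? = w.head? := by
  rw [pv_join_cons]
  rcases w with _ | ⟨a, w'⟩
  · exact absurd rfl h
  · simp

theorem pv_join_last (ws : List (List Char)) (h : ∀ w ∈ ws, w ≠ [] ∧ ∀ c ∈ w, pvD c = false) :
    ∀ c, (pvJoin ws).getLast? = some c → pvD c = false := by
  induction ws with
  | nil => intro c hc; rw [pv_join_nil] at hc; simp at hc
  | cons w ws ih =>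
    intro c hc
    rw [pv_join_cons] at hc
    rcases ws with _ | ⟨v, ws'⟩
    · simp at hc
      exact (h w (by simp)).2 c (List.mem_of_getLast? hc)
    · rw [if_neg (by simp : ¬(v :: ws' = [])), List.getLast?_append] at hc
      have hne : pvJoin (v :: ws') ≠ [] := fun hcontra => by
        exact List.cons_ne_nil _ _ ((pv_join_eq_nil_iff (v :: ws')
          (fun x hx => (h x (List.mem_cons_of_mem _ hx)).1)).mp hcontra)
      have hcons : (' ' :: pvJoin (v :: ws')).getLast? = (pvJoin (v :: ws')).getLast? := by
        rcases hj : pvJoin (v :: ws') with _ | ⟨x, xs⟩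
        · exact absurd hj hne
        · simp
      rw [hcons] at hc
      rcases hg : (pvJoin (v :: ws')).getLast? with _ | g
      · rw [hg] at hc
        simp only [Option.none_or] at hc
        exact (h w (by simp)).2 c (List.mem_of_getLast? hc)
      · rw [hg] at hc
        simp only [Option.some_or, Option.some.injEq] at hc
        subst hc
        exact ih (fun x hx => h x (List.mem_cons_of_mem _ hx)) g hg

theorem pv_join_head' (ws : List (List Char)) (h : ∀ w ∈ ws, w ≠ [] ∧ ∀ c ∈ w, pvD c = false) :
    ∀ c, (pvJoin ws).head? = some c → pvD c = false := by
  intro c hc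
  rcases ws with _ | ⟨w, ws'⟩
  · rw [pv_join_nil] at hc; simp at hc
  · rw [pv_join_head w ws' (h w (by simp)).1] at hc
    exact (h w (by simp)).2 c (List.mem_of_mem_head? hc)

theorem pv_strip_id (l : List Char)
    (hh : ∀ c, l.head? = some c → c ≠ ' ') (hl : ∀ c, l.getLast? = some c → c ≠ ' ') :
    PySem.Chars.stripChars l [' '] = l := by
  rw [PySem.Chars.stripChars]
  have h1 : List.dropWhile (fun c => [' '].contains c) l = l := by
    rw [List.dropWhile_eq_self_iff]
    intro hpos
    have := hh l[0] (by simp [List.head?_eq_getElem?, hpos])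
    simpa using this
  rw [h1]
  have h2 : List.dropWhile (fun c => [' '].contains c) l.reverse = l.reverse := by
    rw [List.dropWhile_eq_self_iff]
    intro hpos
    have hsome : l.getLast? = some (l.reverse[0]) := by
      rw [← List.head?_reverse, List.head?_eq_getElem?]
      exact List.getElem?_eq_getElem hpos
    have := hl _ hsome
    simpa using this
  rw [h2, List.reverse_reverse]

theorem pv_strip_cons_space (l : List Char) :
    PySem.Chars.stripChars (' ' :: l) [' '] = PySem.Chars.stripChars l [' '] := by
  rw [PySem.Chars.stripChars, PySem.Chars.stripChars]
  congr 1

theorem pv_pwords_ne_nil : ∀ (t : List Char) (pl : Bool) (buf : List Char), buf ≠ [] →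
    pvPwords pl buf t ≠ [] := by
  intro t
  induction t with
  | nil => intro pl buf hb; simp [pvPwords, hb]
  | cons c t ih =>
    intro pl buf hb
    simp only [pvPwords]
    split
    · simp
    · exact ih _ _ (by simp)

theorem pv_pwords_props : ∀ (t : List Char) (pl : Bool) (buf : List Char),
    (∀ c ∈ buf, pvD c = false) → (∀ c ∈ t, pvD c = false) →
    ∀ w ∈ pvPwords pl buf t, w ≠ [] ∧ ∀ c ∈ w, pvD c = false := by
  intro t
  induction t with
  | nil =>
    intro pl buf hbuf _ w hw
    simp only [pvPwords] at hw
    split at hw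
    · simp at hw
    · simp at hw
      subst hw
      exact ⟨by assumption, hbuf⟩
  | cons c t ih =>
    intro pl buf hbuf ht w hw
    have hc : pvD c = false := ht c (by simp)
    have ht' : ∀ x ∈ t, pvD x = false := fun x hx => ht x (by simp [hx])
    simp only [pvPwords] at hw
    split at hw
    · rcases List.mem_append.mp hw with hw1 | hw2
      · split at hw1
        · simp at hw1
        · simp at hw1
          subst hw1
          exact ⟨by assumption, hbuf⟩
      · exact ih _ _ (by intro x hx; simp at hx; subst hx; exact hc) ht' w hw2
    · refine ih _ _ ?_ ht' w hw
      intro x hx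
      rcases List.mem_append.mp hx with h1 | h2
      · exact hbuf x h1
      · simp at h2; subst h2; exact hc

theorem pv_expand_buf : ∀ (t : List Char) (prev : Option Char) (buf : List Char), buf ≠ [] →
    buf ++ pvExpand prev t = pvJoin (pvPwords (pvLow prev) buf t) := by
  intro t
  induction t with
  | nil =>
    intro prev buf hb
    simp [pvExpand, pvPwords, hb, pv_join_cons]
  | cons c t ih =>
    intro prev buf hb
    simp only [pvExpand, pvPwords, pv_condA_eq_condP]
    have hlow : pvLow (some c) = PySem.Chars.islower c := rfl
    by_cases hcond : pvCondP (pvLow prev) c t.head? = true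
    · rw [if_pos hcond, if_pos hcond, if_neg hb]
      have h1 : [c] ++ pvExpand (some c) t = pvJoin (pvPwords (pvLow (some c)) [c] t) :=
        ih (some c) [c] (by simp)
      rw [hlow] at h1
      rw [pv_join_append [buf] _ (by simp) (pv_pwords_ne_nil t _ [c] (by simp))]
      rw [← h1, pv_join_cons]
      simp
    · rw [if_neg hcond, if_neg hcond]
      have h1 := ih (some c) (buf ++ [c]) (by simp)
      rw [hlow] at h1
      rw [← h1]
      simp

theorem pv_stripA_eq (p : List Char) (hp : ∀ c ∈ p, pvD c = false) :
    PySem.Chars.stripChars (pvExpand none p) [' '] = pvJoin (pvPwords false [] p) := by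
  rcases p with _ | ⟨c, t⟩
  · simp [pvExpand, pvPwords, pv_join_nil, PySem.Chars.stripChars]
  · have hc : pvD c = false := hp c (by simp)
    have ht : ∀ x ∈ t, pvD x = false := fun x hx => hp x (by simp [hx])
    have hprops : ∀ w ∈ pvPwords (PySem.Chars.islower c) [c] t,
        w ≠ [] ∧ ∀ ch ∈ w, pvD ch = false := by
      refine pv_pwords_props t _ [c] ?_ ht
      intro x hx; simp at hx; subst hx; exact hc
    have hbody : [c] ++ pvExpand (some c) t
        = pvJoin (pvPwords (PySem.Chars.islower c) [c] t) := pv_expand_buf t (some c) [c] (by simp)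
    have hsid : PySem.Chars.stripChars (pvJoin (pvPwords (PySem.Chars.islower c) [c] t)) [' ']
        = pvJoin (pvPwords (PySem.Chars.islower c) [c] t) := by
      refine pv_strip_id _ ?_ ?_
      · intro ch hch
        have := pv_join_head' _ hprops ch hch
        simp only [pvD, Bool.or_eq_false_iff, beq_eq_false_iff_ne] at this
        exact this.1.1
      · intro ch hch
        have := pv_join_last _ hprops ch hch
        simp only [pvD, Bool.or_eq_false_iff, beq_eq_false_iff_ne] at this
        exact this.1.1
    simp only [pvExpand, pvPwords, pv_condA_eq_condP]
    have hlow0 : pvLow none = false := rfl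
    rw [hlow0]
    by_cases hcond : pvCondP false c t.head? = true
    · rw [if_pos hcond, if_pos hcond]
      show PySem.Chars.stripChars (' ' :: ([c] ++ pvExpand (some c) t)) [' '] = _
      rw [pv_strip_cons_space, hbody, hsid]
      simp
    · rw [if_neg hcond, if_neg hcond]
      show PySem.Chars.stripChars ([c] ++ pvExpand (some c) t) [' '] = _
      rw [hbody, hsid]
      simp

-- ---- bwords vs pwords over parts ----

theorem pv_head_part (t : List Char) : pvLow t.head? = pvLow ((pvPA t).1.head?) := by
  rcases t with _ | ⟨x, r⟩
  · rfl
  · by_cases hx : pvD x = true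
    · simp only [pvPA, hx, if_true]
      simp [pvLow, pv_delim_not_lower hx]
    · rw [Bool.not_eq_true] at hx
      simp [pvPA, hx]

theorem pv_bwords_split : ∀ (cs : List Char) (buf : List Char) (prev : Option Char),
    pvBwords prev buf cs
      = pvPwords (pvLow prev) buf (pvPA cs).1 ++ ((pvPA cs).2).flatMap (pvPwords false []) := by
  intro cs
  induction cs with
  | nil => intro buf prev; simp [pvBwords, pvPA, pvPwords]
  | cons c t ih =>
    intro buf prev
    by_cases hd : pvD c = true
    · simp only [pvBwords, pvPA, hd, if_true]
      rw [ih [] (some c)]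
      have : pvLow (some c) = false := by simp [pvLow, pv_delim_not_lower hd]
      rw [this]
      simp only [pvPwords, List.flatMap_cons]
    · rw [Bool.not_eq_true] at hd
      simp only [pvBwords, pvPA, hd, Bool.false_eq_true, if_false]
      have hcond : (PySem.Chars.isupper c && (pvLow prev || pvLow t.head?))
          = pvCondP (pvLow prev) c ((pvPA t).1).head? := by
        rw [pvCondP, ← pv_head_part, Bool.or_comm]
      by_cases hu : pvCondP (pvLow prev) c ((pvPA t).1).head? = true
      · rw [hcond, if_pos hu]
        simp only [pvPwords]
        rw [if_pos hu]
        rw [ih [c] (some c)]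
        simp only [List.append_assoc]
        rfl
      · rw [hcond, if_neg hu]
        simp only [pvPwords]
        rw [if_neg hu]
        rw [ih (buf ++ [c]) (some c)]
        rfl

-- ---- join-filter-flatten ----

theorem pv_filter_nil_iff (rest : List (List (List Char)))
    (h : ∀ ws ∈ rest, ∀ w ∈ ws, w ≠ []) :
    (((rest.map pvJoin).filter (fun y => !(y == []))) = [] ↔ rest.flatten = []) := by
  rw [List.filter_eq_nil_iff, List.flatten_eq_nil_iff]
  constructor
  · intro hf l hl
    have := hf (pvJoin l) (List.mem_map_of_mem hl)
    simp only [Bool.not_eq_true', beq_eq_false_iff_ne] at this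
    have hj : pvJoin l = [] := by simpa using this
    exact (pv_join_eq_nil_iff l (h l hl)).mp hj
  · intro hf y hy
    rcases List.mem_map.mp hy with ⟨l, hl, rfl⟩
    rw [hf l hl, pv_join_nil]
    simp

theorem pv_join_filter (wss : List (List (List Char))) (h : ∀ ws ∈ wss, ∀ w ∈ ws, w ≠ []) :
    pvJoin ((wss.map pvJoin).filter (fun y => !(y == []))) = pvJoin wss.flatten := by
  induction wss with
  | nil => simp
  | cons ws rest ih =>
    have hrest : ∀ x ∈ rest, ∀ w ∈ x, w ≠ [] := fun x hx => h x (List.mem_cons_of_mem _ hx)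
    have ihr := ih hrest
    by_cases hws : ws = []
    · subst hws
      simp only [List.map_cons, List.flatten_cons, List.nil_append, pv_join_nil, List.filter_cons]
      simp only [beq_self_eq_true, Bool.not_true, Bool.false_eq_true, if_false]
      exact ihr
    · have hne : pvJoin ws ≠ [] := fun hc =>
        hws ((pv_join_eq_nil_iff ws (h ws (by simp))).mp hc)
      simp only [List.map_cons, List.flatten_cons, List.filter_cons]
      rw [if_pos (by simpa using hne)]
      rw [pv_join_cons]
      by_cases hf : rest.flatten = []
      · rw [if_pos ((pv_filter_nil_iff rest hrest).mpr hf), hf, List.append_nil]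
        simp
      · rw [if_neg (fun hc => hf ((pv_filter_nil_iff rest hrest).mp hc))]
        rw [ihr]
        rw [pv_join_append ws rest.flatten hws hf]

theorem pv_main (cs : List Char) :
    PySem.Chars.stripChars (pvJoin ((PySem.Chars.splitOn
        (PySem.Chars.replace (PySem.Chars.replace cs ['-'] [' ']) ['_'] [' ']) [' ']).foldl pvPartStepA [])) [' ']
      = pvJoin (pvBwords none [] cs) := by
  have hsubst : PySem.Chars.replace (PySem.Chars.replace cs ['-'] [' ']) ['_'] [' ']
      = cs.map pvSub := by
    rw [pv_replace_char, pv_replace_char, List.map_map]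
    rfl
  rw [hsubst, pv_splitOn_space, pv_sA_map_sub]
  set parts : List (List Char) := (pvPA cs).1 :: (pvPA cs).2 with hparts
  have hnd : ∀ p ∈ parts, ∀ c ∈ p, pvD c = false := by
    intro p hp
    rcases List.mem_cons.mp hp with rfl | hp2
    · exact (pv_pA_no_delim cs).1
    · exact (pv_pA_no_delim cs).2 p hp2
  have hstep : pvPartStepA = fun nps part =>
      if (fun part => !(PySem.Chars.stripChars (pvExpand none part) [' '] == [])) part = true
      then nps ++ [(fun part => PySem.Chars.stripChars (pvExpand none part) [' ']) part] else nps := by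
    funext a b
    simp only [pvPartStepA, pv_foldA_whole]
  rw [hstep, PySem.List.foldl_append_if]
  rw [List.nil_append]
  have hfm : List.map (fun part => PySem.Chars.stripChars (pvExpand none part) [' '])
        (List.filter (fun part => !(PySem.Chars.stripChars (pvExpand none part) [' '] == [])) parts)
      = List.filter (fun y => !(y == []))
        (List.map (fun part => PySem.Chars.stripChars (pvExpand none part) [' ']) parts) := by
    rw [List.filter_map]
    rfl
  rw [hfm]
  have hmap : List.map (fun part => PySem.Chars.stripChars (pvExpand none part) [' ']) parts
      = List.map pvJoin (parts.map (pvPwords false [])) := by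
    rw [List.map_map]
    refine List.map_congr_left ?_
    intro p hp
    exact pv_stripA_eq p (hnd p hp)
  rw [hmap]
  have hwords : ∀ ws ∈ parts.map (pvPwords false []), ∀ w ∈ ws, w ≠ [] := by
    intro ws hws w hw
    rcases List.mem_map.mp hws with ⟨p, hp, rfl⟩
    exact (pv_pwords_props p false [] (by simp) (hnd p hp) w hw).1
  rw [pv_join_filter _ hwords]
  have hallprops : ∀ w ∈ (parts.map (pvPwords false [])).flatten,
      w ≠ [] ∧ ∀ c ∈ w, pvD c = false := by
    intro w hw
    rcases List.mem_flatten.mp hw with ⟨ws, hws, hw2⟩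
    rcases List.mem_map.mp hws with ⟨p, hp, rfl⟩
    exact pv_pwords_props p false [] (by simp) (hnd p hp) w hw2
  rw [pv_strip_id _
    (fun c hc => by
      have := pv_join_head' _ hallprops c hc
      simp only [pvD, Bool.or_eq_false_iff, beq_eq_false_iff_ne] at this
      exact this.1.1)
    (fun c hc => by
      have := pv_join_last _ hallprops c hc
      simp only [pvD, Bool.or_eq_false_iff, beq_eq_false_iff_ne] at this
      exact this.1.1)]
  rw [pv_bwords_split cs [] none]
  have : pvLow none = false := rfl
  rw [this, hparts]
  simp [List.flatMap]

theorem pv_ports_eq (s : String) : to_space_separated_py (some s) = to_space_separated_py_alt (some s) := by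
  unfold to_space_separated_py to_space_separated_py_alt
  simp only [PySem.Str.toList_replace]
  have h1 : ("-" : String).toList = ['-'] := rfl
  have h2 : ("_" : String).toList = ['_'] := rfl
  have h3 : (" " : String).toList = [' '] := rfl
  rw [h1, h2, h3]
  have hB := pv_foldB s.toList [] [] none
  simp only [List.nil_append] at hB
  rw [hB]
  exact congrArg String.ofList (pv_main s.toList)

theorem pv_ports_eq_none : to_space_separated_py none = to_space_separated_py_alt none := by
  unfold to_space_separated_py to_space_separated_py_alt
  simp only [PySem.Str.toList_replace]
  have h1 : ("-" : String).toList = ['-'] := rfl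
  have h2 : ("_" : String).toList = ['_'] := rfl
  have h3 : (" " : String).toList = [' '] := rfl
  rw [h1, h2, h3]
  have hB := pv_foldB ("" : String).toList [] [] none
  simp only [List.nil_append] at hB
  rw [hB]
  exact congrArg String.ofList (pv_main ("" : String).toList)

-- ===== VERDICT (by name: the statement is the Claim_ definition above) =====
theorem to_space_separated_py_spec : Claim_equal_to_space_separated_py := by
  intro text _
  show to_space_separated_py text = to_space_separated_py_alt text
  rcases text with _ | s
  · exact pv_ports_eq_none
  · exact pv_ports_eq s
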